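-- pv_equiv track=rewrite | github.com/htdashti/ctpic | aux_functions.py | parse_atom_nghs
-- ===== SOURCE A (Python) =====
-- def parse_atom_nghs(nghs, atoms_of_interest):
--     nums = {}
--     nghs_list = {}
--     for an_atom in atoms_of_interest:
--         nums[an_atom] = 0
--         nghs_list[an_atom] = []
--     for a_ngh in nghs:
--         if a_ngh[1] in nums:
--             nums[a_ngh[1]] += 1
--             nghs_list[a_ngh[1]].append(a_ngh[0])
--     return nums, nghs_list
-- ===== SOURCE B (Python) =====
-- def parse_atom_nghs(nghs, atoms_of_interest):
--     # Build a full index of ALL neighbors grouped by their second component,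
--     # then extract (count, group) per atom of interest.
--     groups = {}
--     for src, dst in nghs:
--         groups.setdefault(dst, []).append(src)
--     nums = {}
--     nghs_list = {}
--     for atom in atoms_of_interest:
--         members = list(groups.get(atom, ()))
--         nghs_list[atom] = members
--         nums[atom] = len(members)
--     return nums, nghs_list
-- ===== Notes on version B (the rewrite author's own statement) =====
-- stated objective: alternative
-- what changed: B builds one unfiltered grouping index of all neighbors keyed by their target atom, then a second pass over atoms_of_interest extracts each atom's (possibly empty) group and its length, instead of A's filter-during-scan that tests every neighbor against the pre-seeded result dicts and mutates both counters in place.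
import Mathlib
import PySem

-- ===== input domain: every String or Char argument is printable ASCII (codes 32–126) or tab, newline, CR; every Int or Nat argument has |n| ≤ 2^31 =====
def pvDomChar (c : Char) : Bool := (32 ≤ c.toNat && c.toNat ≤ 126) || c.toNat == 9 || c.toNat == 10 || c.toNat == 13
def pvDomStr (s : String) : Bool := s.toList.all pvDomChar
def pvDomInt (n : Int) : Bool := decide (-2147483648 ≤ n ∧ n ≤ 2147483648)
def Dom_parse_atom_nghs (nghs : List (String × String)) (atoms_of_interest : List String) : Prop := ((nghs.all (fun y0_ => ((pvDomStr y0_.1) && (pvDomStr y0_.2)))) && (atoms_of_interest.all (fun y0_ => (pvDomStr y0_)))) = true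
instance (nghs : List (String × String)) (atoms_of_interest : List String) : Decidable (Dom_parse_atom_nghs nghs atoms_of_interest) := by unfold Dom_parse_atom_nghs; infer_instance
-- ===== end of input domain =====

-- B replaces A's filter-during-scan (pre-seeded result dicts, per-neighbor membership test and
-- in-place counter updates) by one unfiltered grouping index over all neighbors followed by a
-- per-atom extraction pass; same cost, different decomposition (objective: alternative).

-- ===== PORT A =====
def parse_atom_nghs (nghs : List (String × String)) (atoms_of_interest : List String) :
    (List (String × Int)) × (List (String × List String)) :=
  -- nums = {}; nghs_list = {}; for an_atom in atoms_of_interest: nums[an_atom] = 0; nghs_list[an_atom] = []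
  let init : PySem.Dict String Int × PySem.Dict String (List String) :=
    atoms_of_interest.foldl
      (fun st an_atom => (st.1.insert an_atom 0, st.2.insert an_atom []))
      (PySem.Dict.empty, PySem.Dict.empty)
  -- for a_ngh in nghs: if a_ngh[1] in nums: nums[a_ngh[1]] += 1; nghs_list[a_ngh[1]].append(a_ngh[0])
  let final :=
    nghs.foldl
      (fun st a_ngh =>
        if st.1.contains a_ngh.2 then
          (st.1.modify a_ngh.2 0 (· + 1), st.2.modify a_ngh.2 [] (· ++ [a_ngh.1]))
        else st)
      init
  (final.1.items, final.2.items)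

-- ===== PORT B =====
def parse_atom_nghs_alt (nghs : List (String × String)) (atoms_of_interest : List String) :
    (List (String × Int)) × (List (String × List String)) :=
  -- groups = {}; for src, dst in nghs: groups.setdefault(dst, []).append(src)
  let groups : PySem.Dict String (List String) :=
    nghs.foldl (fun d p => d.modify p.2 [] (· ++ [p.1])) PySem.Dict.empty
  -- for atom in atoms_of_interest: members = list(groups.get(atom, ())); nghs_list[atom] = members; nums[atom] = len(members)
  let final : PySem.Dict String Int × PySem.Dict String (List String) :=
    atoms_of_interest.foldl
      (fun st atom =>
        let members := groups.getD atom []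
        (st.1.insert atom (members.length : Int), st.2.insert atom members))
      (PySem.Dict.empty, PySem.Dict.empty)
  (final.1.items, final.2.items)

-- ===== PRECONDITION & SPEC =====
def Spec_parse_atom_nghs (nghs : List (String × String)) (atoms_of_interest : List String) (out : (List (String × Int)) × (List (String × List String))) : Prop := out = parse_atom_nghs_alt nghs atoms_of_interest
instance (nghs : List (String × String)) (atoms_of_interest : List String) (out : (List (String × Int)) × (List (String × List String))) : Decidable (Spec_parse_atom_nghs nghs atoms_of_interest out) := by unfold Spec_parse_atom_nghs; infer_instance

-- ===== CLAIM (what is proved, stated in full; the proofs are below) =====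
def Claim_equal_parse_atom_nghs : Prop := ∀ (nghs : List (String × String)) (atoms_of_interest : List String), Dom_parse_atom_nghs nghs atoms_of_interest → Spec_parse_atom_nghs nghs atoms_of_interest (parse_atom_nghs nghs atoms_of_interest)

-- ===== LEMMAS AND PROOFS =====

-- A's seeding loop updates the two dicts independently, so it splits into two folds
theorem pv_split_init (atoms : List String)
    (n : PySem.Dict String Int) (g : PySem.Dict String (List String)) :
    atoms.foldl (fun st a => (st.1.insert a 0, st.2.insert a [])) (n, g)
      = (atoms.foldl (fun d a => d.insert a 0) n, atoms.foldl (fun d a => d.insert a []) g) := by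
  induction atoms generalizing n g with
  | nil => rfl
  | cons a rest ih => exact ih _ _

-- B's extraction loop likewise splits into two folds
theorem pv_split_extract (atoms : List String) (gr : PySem.Dict String (List String))
    (n : PySem.Dict String Int) (g : PySem.Dict String (List String)) :
    atoms.foldl
      (fun st atom => (st.1.insert atom ((gr.getD atom []).length : Int),
                       st.2.insert atom (gr.getD atom []))) (n, g)
      = (atoms.foldl (fun d atom => d.insert atom ((gr.getD atom []).length : Int)) n,
         atoms.foldl (fun d atom => d.insert atom (gr.getD atom [])) g) := by
  induction atoms generalizing n g with
  | nil => rfl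
  | cons a rest ih => exact ih _ _

-- A's neighbor loop: the guard only inspects the first dict, whose key set never changes,
-- so the coupled fold splits into two guarded folds with the guard fixed to the initial dict
theorem pv_loopA_decompose (nghs : List (String × String))
    (n : PySem.Dict String Int) (g : PySem.Dict String (List String)) :
    nghs.foldl
      (fun st p =>
        if st.1.contains p.2 then
          (st.1.modify p.2 0 (· + 1), st.2.modify p.2 [] (· ++ [p.1]))
        else st) (n, g)
    = (nghs.foldl (fun d p => if n.contains p.2 then d.modify p.2 0 (· + 1) else d) n,
       nghs.foldl (fun d p => if n.contains p.2 then d.modify p.2 [] (· ++ [p.1]) else d) g) := by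
  induction nghs generalizing n g with
  | nil => rfl
  | cons p rest ih =>
    by_cases h : n.contains p.2 = true
    · have hc : ∀ q : String × String,
          (n.modify p.2 0 (· + 1)).contains q.2 = n.contains q.2 := by
        intro q
        rw [PySem.Dict.contains_modify]
        cases hb : q.2 == p.2 with
        | true => simp [eq_of_beq hb, h]
        | false => simp
      have hfun1 : (fun (d : PySem.Dict String Int) (q : String × String) =>
            if (n.modify p.2 0 (· + 1)).contains q.2 then d.modify q.2 0 (· + 1) else d)
          = (fun d q => if n.contains q.2 then d.modify q.2 0 (· + 1) else d) :=
        funext fun d => funext fun q => by rw [hc q]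
      have hfun2 : (fun (d : PySem.Dict String (List String)) (q : String × String) =>
            if (n.modify p.2 0 (· + 1)).contains q.2 then d.modify q.2 [] (· ++ [q.1]) else d)
          = (fun d q => if n.contains q.2 then d.modify q.2 [] (· ++ [q.1]) else d) :=
        funext fun d => funext fun q => by rw [hc q]
      simp only [List.foldl_cons, h, if_true]
      rw [ih]
      rw [← hfun1, ← hfun2]
    · simp only [List.foldl_cons, h, Bool.false_eq_true, if_false]
      exact ih n g

-- value of a key after a loop of inserts whose value depends only on the key
theorem pv_getD_foldl_insert_key {ν : Type} (l : List String) (v : String → ν)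
    (d : PySem.Dict String ν) (k : String) (dflt : ν) :
    (l.foldl (fun d a => d.insert a (v a)) d).getD k dflt
      = if k ∈ l then v k else d.getD k dflt := by
  induction l generalizing d with
  | nil => simp
  | cons a rest ih =>
    simp only [List.foldl_cons, ih, List.mem_cons]
    by_cases hl : k ∈ rest
    · simp [hl]
    · by_cases ha : k = a
      · simp [ha]
      · simp [hl, ha, PySem.Dict.getD_insert]

-- keys after a loop of inserts whose value depends only on the key
theorem pv_keys_foldl_insert_key {ν : Type} (l : List String) (v : String → ν)
    (d : PySem.Dict String ν) :
    (l.foldl (fun d a => d.insert a (v a)) d).keys = PySem.Set.update d.keys l :=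
  PySem.Dict.keys_foldl_insert l (fun _ a => v a) d

-- keys after a grouping/counting loop keyed by the second component
theorem pv_keys_foldl_modify_snd {ν : Type} (l : List (String × String)) (d0 : ν)
    (f : String × String → ν → ν) (d : PySem.Dict String ν) :
    (l.foldl (fun d p => d.modify p.2 d0 (f p)) d).keys
      = PySem.Set.update d.keys (l.map (·.2)) :=
  PySem.Dict.keys_foldl_modify_key l (·.2) d0 (fun _ p => f p) d

-- updating a set with elements it already contains leaves it unchanged
theorem pv_set_update_of_subset (s : PySem.Set String) (l : List String)
    (h : ∀ x ∈ l, x ∈ s) : PySem.Set.update s l = s := by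
  induction l generalizing s with
  | nil => exact PySem.Set.update_nil s
  | cons x rest ih =>
    have hx : PySem.Set.add s x = s := PySem.Set.add_of_mem (h x (by simp))
    have hstep : PySem.Set.update s (x :: rest) = PySem.Set.update (PySem.Set.add s x) rest := by
      simp [PySem.Set.update]
    rw [hstep, hx]
    exact ih s (fun y hy => h y (by simp [hy]))

-- the pre-filter by membership does not change which neighbors match a key of interest
theorem pv_filter_filter_eq (nghs : List (String × String)) (c : String → Bool)
    (k : String) (hk : c k = true) :
    (nghs.filter (fun p => c p.2)).filter (fun p => p.2 == k)
      = nghs.filter (fun p => p.2 == k) := by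
  rw [List.filter_filter]
  refine List.filter_congr ?_
  intro p _
  cases hb : p.2 == k with
  | true => simp [eq_of_beq hb, hk]
  | false => simp

-- a grouping fold keyed by the second component, read back at k
theorem pv_group_fold_getD (l : List (String × String))
    (g : PySem.Dict String (List String)) (k : String) :
    (l.foldl (fun d p => d.modify p.2 [] (· ++ [p.1])) g).getD k []
      = g.getD k [] ++ (l.filter (fun p => p.2 == k)).map (·.1) := by
  rw [show l.foldl (fun d p => d.modify p.2 [] (· ++ [p.1])) g
      = (l.map (fun p => (p.2, p.1))).foldl (fun d p => d.modify p.1 [] (· ++ [p.2])) g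
      by rw [List.foldl_map]]
  rw [PySem.Dict.getD_foldl_modify_append, List.filter_map]
  have hmm : ((l.filter ((fun p => p.1 == k) ∘ fun p => (p.2, p.1))).map (fun p => (p.2, p.1))).map
      (fun x => x.2) = (l.filter (fun p => p.2 == k)).map (·.1) := by
    rw [List.map_map]; rfl
  rw [hmm]

-- a counting fold keyed by the second component, read back at k
theorem pv_count_fold_getD (l : List (String × String))
    (n : PySem.Dict String Int) (k : String) :
    (l.foldl (fun d p => d.modify p.2 0 (· + 1)) n).getD k 0
      = n.getD k 0 + ((l.map (·.2)).count k : Int) := by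
  rw [show l.foldl (fun d p => d.modify p.2 0 (· + 1)) n
      = (l.map (·.2)).foldl (fun d x => d.modify x 0 (· + 1)) n by rw [List.foldl_map]]
  rw [PySem.Dict.getD_foldl_modify_add_one]

-- ===== VERDICT (by name: the statement is the Claim_ definition above) =====
theorem parse_atom_nghs_spec : Claim_equal_parse_atom_nghs := by
  intro nghs atoms _
  show parse_atom_nghs nghs atoms = parse_atom_nghs_alt nghs atoms
  unfold parse_atom_nghs parse_atom_nghs_alt
  simp only []
  rw [pv_split_init, pv_split_extract, pv_loopA_decompose]
  simp only [← List.foldl_filter]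
  set n0 : PySem.Dict String Int :=
    atoms.foldl (fun d a => d.insert a 0) PySem.Dict.empty with hn0
  set g0 : PySem.Dict String (List String) :=
    atoms.foldl (fun d a => d.insert a []) PySem.Dict.empty with hg0
  set groups : PySem.Dict String (List String) :=
    nghs.foldl (fun d p => d.modify p.2 [] (· ++ [p.1])) PySem.Dict.empty with hgr
  set K : PySem.Set String := PySem.Set.update ([] : PySem.Set String) atoms with hK
  have hnodupK : K.Nodup := PySem.Set.nodup_update _ _ List.nodup_nil
  have hkn0 : n0.keys = K := by
    rw [hn0, pv_keys_foldl_insert_key atoms (fun _ => (0 : Int))]; simp [hK]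
  have hkg0 : g0.keys = K := by
    rw [hg0, pv_keys_foldl_insert_key atoms (fun _ => ([] : List String))]; simp [hK]
  have hmemK : ∀ k, k ∈ K ↔ k ∈ atoms := by
    intro k; rw [hK, PySem.Set.mem_update]; simp
  have hcont : ∀ k, n0.contains k = true ↔ k ∈ atoms := by
    intro k; rw [PySem.Dict.contains_iff_mem_keys, hkn0, hmemK]
  set fl := nghs.filter (fun p => n0.contains p.2) with hfl
  have hflmem : ∀ x ∈ fl.map (·.2), x ∈ K := by
    intro x hx
    obtain ⟨p, hp, rfl⟩ := List.mem_map.mp hx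
    have hcp := (List.mem_filter.mp (hfl ▸ hp)).2
    rw [← hkn0]
    exact (PySem.Dict.contains_iff_mem_keys n0 p.2).mp hcp
  -- keys of the four final dicts
  have hkA1 : (fl.foldl (fun d p => d.modify p.2 0 (· + 1)) n0).keys = K := by
    rw [pv_keys_foldl_modify_snd fl 0 (fun _ => (· + 1)) n0, hkn0]
    exact pv_set_update_of_subset _ _ hflmem
  have hkA2 : (fl.foldl (fun d p => d.modify p.2 [] (· ++ [p.1])) g0).keys = K := by
    rw [pv_keys_foldl_modify_snd fl [] (fun p => (· ++ [p.1])) g0, hkg0]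
    exact pv_set_update_of_subset _ _ hflmem
  have hkB1 : (atoms.foldl (fun d a => d.insert a ((groups.getD a []).length : Int))
      PySem.Dict.empty).keys = K := by
    rw [pv_keys_foldl_insert_key atoms (fun a => ((groups.getD a []).length : Int))]
    simp [hK]
  have hkB2 : (atoms.foldl (fun d a => d.insert a (groups.getD a []))
      PySem.Dict.empty).keys = K := by
    rw [pv_keys_foldl_insert_key atoms (fun a => groups.getD a [])]
    simp [hK]
  -- per-key value agreement for keys of interest
  have hlist : ∀ k ∈ atoms,
      (fl.foldl (fun d p => d.modify p.2 [] (· ++ [p.1])) g0).getD k []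
        = groups.getD k [] := by
    intro k hk
    rw [pv_group_fold_getD, hgr, pv_group_fold_getD]
    rw [hg0, pv_getD_foldl_insert_key atoms (fun _ => ([] : List String))]
    rw [hfl, pv_filter_filter_eq nghs (fun x => n0.contains x) k ((hcont k).mpr hk)]
    simp [hk]
  have hnum : ∀ k ∈ atoms,
      (fl.foldl (fun d p => d.modify p.2 0 (· + 1)) n0).getD k 0
        = ((groups.getD k []).length : Int) := by
    intro k hk
    rw [pv_count_fold_getD]
    rw [hn0, pv_getD_foldl_insert_key atoms (fun _ => (0 : Int))]
    rw [hgr, pv_group_fold_getD]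
    have hcnt : (fl.map (·.2)).count k = (nghs.filter (fun p => p.2 == k)).length := by
      rw [List.count_eq_length_filter, List.filter_map,
        show ((fun x => x == k) ∘ fun (p : String × String) => p.2)
            = (fun p => p.2 == k) from rfl]
      rw [List.length_map, hfl,
        pv_filter_filter_eq nghs (fun x => n0.contains x) k ((hcont k).mpr hk)]
    rw [hcnt]
    simp [hk]
  -- assemble: items = keys.map (key, value) on both sides, keys and values agree
  have e1 : (fl.foldl (fun d p => d.modify p.2 0 (· + 1)) n0).items
      = (atoms.foldl (fun d a => d.insert a ((groups.getD a []).length : Int))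
          PySem.Dict.empty).items := by
    rw [PySem.Dict.items_eq_map_keys _ (by rw [hkA1]; exact hnodupK) 0,
        PySem.Dict.items_eq_map_keys _ (by rw [hkB1]; exact hnodupK) 0, hkA1, hkB1]
    refine List.map_congr_left ?_
    intro k hkK
    have hk := (hmemK k).mp hkK
    rw [hnum k hk, pv_getD_foldl_insert_key atoms (fun a => ((groups.getD a []).length : Int))]
    simp [hk]
  have e2 : (fl.foldl (fun d p => d.modify p.2 [] (· ++ [p.1])) g0).items
      = (atoms.foldl (fun d a => d.insert a (groups.getD a []))
          PySem.Dict.empty).items := by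
    rw [PySem.Dict.items_eq_map_keys _ (by rw [hkA2]; exact hnodupK) [],
        PySem.Dict.items_eq_map_keys _ (by rw [hkB2]; exact hnodupK) [], hkA2, hkB2]
    refine List.map_congr_left ?_
    intro k hkK
    have hk := (hmemK k).mp hkK
    rw [hlist k hk, pv_getD_foldl_insert_key atoms (fun a => groups.getD a [])]
    simp [hk]
  exact Prod.ext e1 e2
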